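-- pv_equiv track=rewrite | github.com/dkoMines/adventofcode | 2021/problem_8.py | compare_codes
-- ===== SOURCE A (Python) =====
-- def compare_codes(code1, code2):
--     for a in code1:
--         if not a in code2:
--             return False
--     for a in code2:
--         if not a in code1:
--             return False
--     return True
-- ===== SOURCE B (Python) =====
-- def compare_codes(code1, code2):
--     # Presence bitmask: bit ord(c) is set iff c occurs in the string.
--     # The two strings have identical character sets iff their masks are equal.
--     mask1 = 0
--     for c in code1:
--         mask1 |= 1 << ord(c)
--     mask2 = 0
--     for c in code2:
--         mask2 |= 1 << ord(c)
--     return mask1 == mask2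
-- ===== Notes on version B (the rewrite author's own statement) =====
-- stated objective: alternative
-- what changed: A's two mutual-membership scanning loops with early returns are replaced by folding each string once into an integer presence bitmask (bit ord(c) per character) and comparing the two masks for equality.
import Mathlib
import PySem

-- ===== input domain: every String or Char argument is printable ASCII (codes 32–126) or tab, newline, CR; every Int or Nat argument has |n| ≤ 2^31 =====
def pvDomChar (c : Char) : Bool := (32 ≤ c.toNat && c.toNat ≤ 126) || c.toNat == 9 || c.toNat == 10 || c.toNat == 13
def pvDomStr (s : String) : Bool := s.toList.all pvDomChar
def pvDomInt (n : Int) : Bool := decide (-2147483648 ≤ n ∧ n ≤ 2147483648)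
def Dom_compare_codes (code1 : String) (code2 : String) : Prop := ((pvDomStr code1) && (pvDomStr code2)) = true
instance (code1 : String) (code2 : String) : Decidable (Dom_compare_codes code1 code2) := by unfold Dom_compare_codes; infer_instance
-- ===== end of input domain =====

-- B replaces A's two mutual-membership scanning loops by folding each string once
-- into an integer presence bitmask (bit ord(c) per character) and comparing the masks.
-- ===== PORT A =====
-- one 'for a in cs: if a not in other: return False' loop of A
def scanLoop (cs : List Char) (other : List Char) : Bool :=
  match cs with
  | [] => true
  | a :: rest => if !(other.contains a) then false else scanLoop rest other

def compare_codes (code1 : String) (code2 : String) : Bool :=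
  if scanLoop code1.toList code2.toList = false then false
  else if scanLoop code2.toList code1.toList = false then false
  else true

-- ===== PORT B =====
def maskOf (cs : List Char) : Nat :=
  cs.foldl (fun m c => m ||| (1 <<< c.toNat)) 0

def compare_codes_alt (code1 : String) (code2 : String) : Bool :=
  maskOf code1.toList == maskOf code2.toList

-- ===== PRECONDITION & SPEC =====
def Spec_compare_codes (code1 : String) (code2 : String) (out : Bool) : Prop := out = compare_codes_alt code1 code2
instance (code1 : String) (code2 : String) (out : Bool) : Decidable (Spec_compare_codes code1 code2 out) := by unfold Spec_compare_codes; infer_instance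

-- ===== CLAIM (what is proved, stated in full; the proofs are below) =====
def Claim_equal_compare_codes : Prop := ∀ (code1 : String) (code2 : String), Dom_compare_codes code1 code2 → Spec_compare_codes code1 code2 (compare_codes code1 code2)

-- ===== LEMMAS AND PROOFS =====
theorem scanLoop_iff (cs other : List Char) : scanLoop cs other = true ↔ ∀ a ∈ cs, a ∈ other := by
  induction cs with
  | nil => simp [scanLoop]
  | cons a rest ih => simp [scanLoop, ih]

theorem testBit_maskFold (cs : List Char) (m : Nat) (i : Nat) :
    Nat.testBit (cs.foldl (fun m c => m ||| (1 <<< c.toNat)) m) i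
      = (Nat.testBit m i || cs.any (fun c => c.toNat == i)) := by
  induction cs generalizing m with
  | nil => simp
  | cons a rest ih =>
      rw [List.foldl_cons, ih, List.any_cons, Nat.testBit_or, Nat.one_shiftLeft]
      by_cases h : a.toNat = i
      · subst h; simp [Nat.testBit_two_pow_self]
      · have hne : (a.toNat == i) = false := by simp [h]
        simp [Nat.testBit_two_pow_of_ne h, hne]

theorem testBit_maskOf (cs : List Char) (i : Nat) :
    Nat.testBit (maskOf cs) i = cs.any (fun c => c.toNat == i) := by
  simpa using testBit_maskFold cs 0 i

theorem char_toNat_inj {a b : Char} (h : a.toNat = b.toNat) : a = b :=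
  Char.ext (UInt32.toNat_inj.mp h)

theorem maskOf_eq_iff (cs ds : List Char) :
    maskOf cs = maskOf ds ↔ (∀ a, a ∈ cs ↔ a ∈ ds) := by
  have any_iff : ∀ (es : List Char) (a : Char),
      es.any (fun c => c.toNat == a.toNat) = true ↔ a ∈ es := by
    intro es a
    simp only [List.any_eq_true, beq_iff_eq]
    constructor
    · rintro ⟨b, hb, hbe⟩; exact (char_toNat_inj hbe) ▸ hb
    · intro ha; exact ⟨a, ha, rfl⟩
  constructor
  · intro h a
    have := congrArg (fun n => Nat.testBit n a.toNat) h
    simp only [testBit_maskOf] at this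
    rw [← any_iff cs a, ← any_iff ds a, this]
  · intro h
    apply Nat.eq_of_testBit_eq
    intro i
    simp only [testBit_maskOf]
    rw [Bool.eq_iff_iff]
    simp only [List.any_eq_true]
    exact ⟨fun ⟨b, hb, hbe⟩ => ⟨b, (h b).mp hb, hbe⟩,
           fun ⟨b, hb, hbe⟩ => ⟨b, (h b).mpr hb, hbe⟩⟩

-- ===== VERDICT (by name: the statement is the Claim_ definition above) =====
theorem compare_codes_spec : Claim_equal_compare_codes := by
  intro code1 code2 _
  unfold Spec_compare_codes compare_codes compare_codes_alt
  rw [Bool.eq_iff_iff, beq_iff_eq, maskOf_eq_iff]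
  constructor
  · intro h a
    by_cases h1 : scanLoop code1.toList code2.toList = false
    · simp [h1] at h
    · by_cases h2 : scanLoop code2.toList code1.toList = false
      · simp [h1, h2] at h
      · rw [Bool.not_eq_false, scanLoop_iff] at h1 h2
        exact ⟨fun hx => h1 a hx, fun hx => h2 a hx⟩
  · intro h
    have h1 : scanLoop code1.toList code2.toList = true := by
      rw [scanLoop_iff]; exact fun a ha => (h a).mp ha
    have h2 : scanLoop code2.toList code1.toList = true := by
      rw [scanLoop_iff]; exact fun a ha => (h a).mpr ha
    simp [h1, h2]
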